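-- pv_equiv track=rewrite | github.com/makilller/ans | q1.py | min_subsequences
-- ===== SOURCE A (Python) =====
-- def min_subsequences(source: str, target: str) -> int:
--     # 首先检查是否所有的目标字符串都在源字符串中
--     source_set = set(source)
--     for char in target:
--         if char not in source_set:
--             return -1
--
--
--     source_len = len(source)
--     target_len = len(target)
--     source_idx = 0
--     target_idx = 0
--     subsequences_count = 0
--     # 贪心匹配
--     while target_idx < target_len:
--         subsequences_count += 1
--         source_idx = 0
--         while source_idx < source_len and target_idx < target_len:
--             if source[source_idx] == target[target_idx]:
--                 target_idx += 1
--             source_idx += 1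
--
--     return subsequences_count
-- ===== SOURCE B (Python) =====
-- def min_subsequences(source: str, target: str) -> int:
--     # Index source once: for each character, the sorted list of its positions.
--     pos = {}
--     for i, ch in enumerate(source):
--         pos.setdefault(ch, []).append(i)
--     count = 1 if target else 0
--     cur = 0
--     for ch in target:
--         ps = pos.get(ch, [])
--         if not ps:
--             return -1
--         # binary search: first position >= cur
--         lo, hi = 0, len(ps)
--         while lo < hi:
--             mid = (lo + hi) // 2
--             if ps[mid] < cur:
--                 lo = mid + 1
--             else:
--                 hi = mid
--         if lo == len(ps):
--             count += 1
--             cur = ps[0] + 1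
--         else:
--             cur = ps[lo] + 1
--     return count
-- ===== Notes on version B (the rewrite author's own statement) =====
-- stated objective: alternative
-- what changed: B builds a per-character index of source positions once (dict of sorted position lists) and answers each target character with a binary search for the next occurrence, wrapping around (one more subsequence) when none remains, instead of A's repeated character-by-character rescans of source; on random inputs A's passes are few, so B is not measurably faster.
import Mathlib
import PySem

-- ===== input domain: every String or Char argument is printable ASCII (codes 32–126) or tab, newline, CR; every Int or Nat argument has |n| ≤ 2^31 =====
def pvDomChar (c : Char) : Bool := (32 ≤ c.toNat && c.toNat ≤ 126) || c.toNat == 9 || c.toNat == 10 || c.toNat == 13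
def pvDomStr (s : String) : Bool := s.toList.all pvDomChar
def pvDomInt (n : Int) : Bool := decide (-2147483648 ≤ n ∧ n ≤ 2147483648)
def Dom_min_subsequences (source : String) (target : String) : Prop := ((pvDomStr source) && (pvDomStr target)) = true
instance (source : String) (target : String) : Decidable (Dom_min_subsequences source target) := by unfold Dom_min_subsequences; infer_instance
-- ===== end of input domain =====

-- B replaces A's repeated rescans of `source` by a per-character position index built
-- once, plus a binary search per target character (objective: alternative algorithm).

-- ===== PORT A =====
-- inner `while source_idx < source_len and target_idx < target_len` loop: walks the
-- remaining source characters, advancing target_idx on a match; returns the new target_idx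
def pvOnePassA (src : List Char) (tgt : List Char) (ti : Nat) : Nat :=
  match src with
  | [] => ti
  | c :: rest =>
    if ti < tgt.length then
      if tgt[ti]? = some c then pvOnePassA rest tgt (ti + 1) else pvOnePassA rest tgt ti
    else ti

-- outer `while target_idx < target_len` loop; fuel `tgt.length + 1` only makes the
-- recursion structural — each pass advances target_idx (every target char occurs in
-- src once the membership check passed), so the fuel is never exhausted
def pvLoopA (src : List Char) (tgt : List Char) : Nat → Nat → Int → Int
  | 0, _, cnt => cnt
  | fuel + 1, ti, cnt =>
    if ti < tgt.length then pvLoopA src tgt fuel (pvOnePassA src tgt ti) (cnt + 1)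
    else cnt

def min_subsequences (source : String) (target : String) : Int :=
  let src := source.toList
  let tgt := target.toList
  let sourceSet := PySem.Set.ofList src
  if tgt.all (fun c => PySem.Set.contains sourceSet c) then
    pvLoopA src tgt (tgt.length + 1) 0 0
  else -1

-- ===== PORT B =====
-- `for i, ch in enumerate(source): pos.setdefault(ch, []).append(i)`
def pvBuildPos (src : List Char) : PySem.Dict Char (List Int) :=
  (PySem.List.enumerate src).foldl (fun d p => d.modify p.2 [] (· ++ [p.1])) PySem.Dict.empty

-- `while lo < hi:` binary search for the first index with ps[mid] >= cur; `(lo+hi)//2`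
-- is Nat division on nonnegative operands, identical to Python floor division here;
-- ps[mid] with 0 ≤ mid < len(ps) is always in range, so List.getD is exact here
def pvBisect (ps : List Int) (cur : Int) (lo hi : Nat) : Nat :=
  if _h : lo < hi then
    let mid := (lo + hi) / 2
    if ps.getD mid 0 < cur then pvBisect ps cur (mid + 1) hi
    else pvBisect ps cur lo mid
  else lo
termination_by hi - lo
decreasing_by all_goals omega

-- `for ch in target:` with state (count, cur); `pos.get(ch, [])` is Dict.getD;
-- ps[0] / ps[lo] are in range whenever evaluated (ps nonempty, lo < len), so List.getD is exact
def pvLoopB (pos : PySem.Dict Char (List Int)) : List Char → Int → Int → Int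
  | [], cnt, _ => cnt
  | c :: rest, cnt, cur =>
    let ps := pos.getD c []
    if ps.isEmpty then -1
    else
      let lo := pvBisect ps cur 0 ps.length
      if lo = ps.length then pvLoopB pos rest (cnt + 1) (ps.getD 0 0 + 1)
      else pvLoopB pos rest cnt (ps.getD lo 0 + 1)

def min_subsequences_alt (source : String) (target : String) : Int :=
  let pos := pvBuildPos source.toList
  let tgt := target.toList
  pvLoopB pos tgt (if tgt.isEmpty then 0 else 1) 0

-- ===== PRECONDITION & SPEC =====
def Spec_min_subsequences (source : String) (target : String) (out : Int) : Prop := out = min_subsequences_alt source target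
instance (source : String) (target : String) (out : Int) : Decidable (Spec_min_subsequences source target out) := by unfold Spec_min_subsequences; infer_instance

-- ===== CLAIM (what is proved, stated in full; the proofs are below) =====
def Claim_equal_min_subsequences : Prop := ∀ (source : String) (target : String), Dom_min_subsequences source target → Spec_min_subsequences source target (min_subsequences source target)

-- ===== LEMMAS AND PROOFS =====

-- sorted list of the positions (as Python ints) of c in src, offset by k
def pvPosFrom : List Char → Char → Nat → List Int
  | [], _, _ => []
  | d :: rest, c, k =>
    if d = c then (k : Int) :: pvPosFrom rest c (k + 1) else pvPosFrom rest c (k + 1)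

-- reference loop both ports are reduced to: one pass over target, next occurrence
-- of c strictly after cur via find? on the position list
def pvNxt (src : List Char) (c : Char) (cur : Int) : Option Int :=
  (pvPosFrom src c 0).find? (fun x => decide (cur < x))

def pvRgo (src : List Char) : List Char → Int → Int → Int
  | [], cnt, _ => cnt
  | c :: rest, cnt, cur =>
    match pvNxt src c cur with
    | some j => pvRgo src rest cnt j
    | none =>
      match pvNxt src c (-1) with
      | some j => pvRgo src rest (cnt + 1) j
      | none => -1

theorem pvPosFrom_bounds : ∀ (src : List Char) (c : Char) (k : Nat) (x : Int),
    x ∈ pvPosFrom src c k → (k : Int) ≤ x := by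
  intro src c
  induction src with
  | nil => intro k x h; simp [pvPosFrom] at h
  | cons d rest ih =>
    intro k x h
    simp only [pvPosFrom] at h
    split at h
    · rcases List.mem_cons.mp h with rfl | h
      · exact le_refl _
      · have := ih (k + 1) x h; push_cast at this ⊢; omega
    · have := ih (k + 1) x h; push_cast at this ⊢; omega

theorem pvPosFrom_ne_nil : ∀ (src : List Char) (c : Char) (k : Nat),
    c ∈ src → pvPosFrom src c k ≠ [] := by
  intro src c
  induction src with
  | nil => intro k h; simp at h
  | cons d rest ih =>
    intro k h
    simp only [pvPosFrom]
    split
    · simp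
    · rcases List.mem_cons.mp h with rfl | h
      · simp_all
      · exact ih (k + 1) h

theorem pvPosFrom_nil : ∀ (src : List Char) (c : Char) (k : Nat),
    c ∉ src → pvPosFrom src c k = [] := by
  intro src c
  induction src with
  | nil => intro k _; rfl
  | cons d rest ih =>
    intro k h
    simp only [pvPosFrom]
    rw [if_neg (by intro hdc; exact h (hdc ▸ List.mem_cons_self))]
    exact ih (k + 1) (fun hm => h (List.mem_cons_of_mem d hm))

-- find? returns the head when the predicate holds everywhere
theorem pvFind?_all {α : Type} (p : α → Bool) : ∀ (l : List α),
    (∀ x ∈ l, p x = true) → l.find? p = l.head? := by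
  intro l h
  cases l with
  | nil => rfl
  | cons a t => rw [List.find?_cons_of_pos (h a List.mem_cons_self)]; rfl

-- threshold shift: the first position > k-1 in the full list is the head of the
-- suffix's position list
theorem pvPosFrom_find_drop : ∀ (k : Nat) (src : List Char) (c : Char) (m : Nat),
    (pvPosFrom src c m).find? (fun x => decide ((m : Int) + (k : Int) - 1 < x)) =
      (pvPosFrom (src.drop k) c (m + k)).head? := by
  intro k
  induction k with
  | zero =>
    intro src c m
    rw [List.drop_zero, Nat.add_zero]
    refine pvFind?_all _ _ (fun x hx => ?_)
    have := pvPosFrom_bounds src c m x hx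
    simp only [decide_eq_true_eq]
    push_cast
    omega
  | succ k' ih =>
    intro src c m
    have hpred : (fun x : Int => decide ((m : Int) + ((k' + 1 : Nat) : Int) - 1 < x)) =
        (fun x : Int => decide (((m + 1 : Nat) : Int) + (k' : Int) - 1 < x)) := by
      funext x; rw [decide_eq_decide]; push_cast; omega
    cases src with
    | nil => simp [pvPosFrom]
    | cons d rest =>
      rw [List.drop_succ_cons]
      have hm : m + (k' + 1) = (m + 1) + k' := by omega
      simp only [pvPosFrom]
      split
      · rw [List.find?_cons_of_neg (by simp only [decide_eq_true_eq]; push_cast; omega)]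
        rw [hpred, ih rest c (m + 1), hm]
      · rw [hpred, ih rest c (m + 1), hm]

theorem pvNxt_drop (src : List Char) (c : Char) (k : Nat) :
    pvNxt src c ((k : Int) - 1) = (pvPosFrom (src.drop k) c k).head? := by
  unfold pvNxt
  have hpred : (fun x : Int => decide ((k : Int) - 1 < x)) =
      (fun x : Int => decide (((0 : Nat) : Int) + (k : Int) - 1 < x)) := by
    funext x; rw [decide_eq_decide]; push_cast; omega
  rw [hpred, pvPosFrom_find_drop k src c 0, Nat.zero_add]

-- one step of A's inner scan, through the position list of the suffix
theorem pvOnePassA_eq : ∀ (s : List Char) (tgt : List Char) (k ti : Nat) (c : Char),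
    ti < tgt.length → tgt[ti]? = some c →
    pvOnePassA s tgt ti =
      (match (pvPosFrom s c k).head? with
       | some j => pvOnePassA (s.drop (j.toNat + 1 - k)) tgt (ti + 1)
       | none => ti) := by
  intro s
  induction s with
  | nil => intro tgt k ti c _ _; simp [pvOnePassA, pvPosFrom]
  | cons d rest ih =>
    intro tgt k ti c hti htc
    simp only [pvOnePassA, if_pos hti, pvPosFrom]
    by_cases hdc : d = c
    · subst hdc
      rw [if_pos htc, if_pos rfl]
      simp only [List.head?_cons]
      have : (k : Int).toNat + 1 - k = 1 := by omega
      rw [this, List.drop_succ_cons, List.drop_zero]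
    · rw [if_neg (by rw [htc]; simp [Ne.symm hdc]), if_neg hdc]
      rw [ih tgt (k + 1) ti c hti htc]
      cases hh : (pvPosFrom rest c (k + 1)).head? with
      | none => rfl
      | some j =>
        simp only []
        have hjk : ((k + 1 : Nat) : Int) ≤ j :=
          pvPosFrom_bounds rest c (k + 1) j (List.mem_of_mem_head? hh)
        have hj1 : j.toNat + 1 - k = (j.toNat + 1 - (k + 1)) + 1 := by
          have : (0:Int) ≤ j := le_trans (by positivity) hjk
          omega
        rw [hj1, List.drop_succ_cons]

theorem pvOnePassA_le : ∀ (s tgt : List Char) (ti : Nat), ti ≤ pvOnePassA s tgt ti := by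
  intro s
  induction s with
  | nil => intro tgt ti; simp [pvOnePassA]
  | cons d rest ih =>
    intro tgt ti
    simp only [pvOnePassA]
    split
    · split
      · exact le_trans (Nat.le_succ ti) (ih tgt (ti + 1))
      · exact ih tgt ti
    · exact le_refl ti

theorem pvOnePassA_stop : ∀ (s tgt : List Char) (ti : Nat),
    ¬ ti < tgt.length → pvOnePassA s tgt ti = ti := by
  intro s
  induction s with
  | nil => intro tgt ti _; rfl
  | cons d rest ih => intro tgt ti h; simp only [pvOnePassA, if_neg h]

-- one full pass of A equals a run of the reference loop until it wraps
theorem pvKey (src tgt : List Char) (hAll : ∀ c ∈ tgt, c ∈ src) :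
    ∀ (n ti k : Nat) (cnt : Int), tgt.length - ti = n →
    pvRgo src (tgt.drop ti) cnt ((k : Int) - 1) =
      (if pvOnePassA (src.drop k) tgt ti < tgt.length then
        pvRgo src (tgt.drop (pvOnePassA (src.drop k) tgt ti)) (cnt + 1) (-1)
      else cnt) := by
  intro n
  induction n using Nat.strong_induction_on with
  | _ n ih =>
    intro ti k cnt hn
    by_cases hti : ti < tgt.length
    · have hdrop : tgt.drop ti = tgt[ti] :: tgt.drop (ti + 1) := List.drop_eq_getElem_cons hti
      have htc : tgt[ti]? = some tgt[ti] := List.getElem?_eq_getElem hti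
      have hone := pvOnePassA_eq (src.drop k) tgt k ti tgt[ti] hti htc
      have hnd := pvNxt_drop src tgt[ti] k
      have hcin : tgt[ti] ∈ src := hAll _ (List.getElem_mem hti)
      have hne0 := pvPosFrom_ne_nil src tgt[ti] 0 hcin
      obtain ⟨j0, t0, hpp⟩ : ∃ j0 t0, pvPosFrom src tgt[ti] 0 = j0 :: t0 := by
        cases hp : pvPosFrom src tgt[ti] 0 with
        | nil => exact absurd hp hne0
        | cons a b => exact ⟨a, b, rfl⟩
      have hm1 : pvNxt src tgt[ti] (-1) = some j0 := by
        unfold pvNxt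
        rw [pvFind?_all _ _ (fun x hx => by
          have := pvPosFrom_bounds src tgt[ti] 0 x hx
          simp only [decide_eq_true_eq]; omega)]
        rw [hpp]; rfl
      rw [hdrop]
      simp only [pvRgo]
      rw [hnd]
      cases hh : (pvPosFrom (src.drop k) tgt[ti] k).head? with
      | some j =>
        simp only [hh] at hone
        have hjk : (k : Int) ≤ j :=
          pvPosFrom_bounds (src.drop k) tgt[ti] k j (List.mem_of_mem_head? hh)
        have hj0 : (0 : Int) ≤ j := le_trans (by positivity) hjk
        have hdd : (src.drop k).drop (j.toNat + 1 - k) = src.drop (j.toNat + 1) := by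
          rw [List.drop_drop]; congr 1; omega
        have hkih := ih (tgt.length - (ti + 1)) (by omega) (ti + 1) (j.toNat + 1) cnt rfl
        have hcast : ((j.toNat + 1 : Nat) : Int) - 1 = j := by push_cast; omega
        rw [hcast] at hkih
        rw [hone, hdd]
        exact hkih
      | none =>
        simp only [hh] at hone
        rw [hm1]
        show pvRgo src (tgt.drop (ti + 1)) (cnt + 1) j0 = _
        rw [hone, if_pos hti, hdrop]
        simp only [pvRgo]
        rw [hm1]
    · have hnil : tgt.drop ti = [] := List.drop_eq_nil_of_le (by omega)
      rw [hnil]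
      rw [pvOnePassA_stop _ _ _ hti, if_neg hti]
      rfl

theorem pvLoopA_eq_Rgo (src tgt : List Char) (hAll : ∀ c ∈ tgt, c ∈ src) :
    ∀ (f ti : Nat) (cnt : Int), tgt.length - ti < f →
    pvLoopA src tgt f ti cnt =
      (if ti < tgt.length then pvRgo src (tgt.drop ti) (cnt + 1) (-1) else cnt) := by
  intro f
  induction f with
  | zero => intro ti cnt h; omega
  | succ f ihf =>
    intro ti cnt hf
    by_cases hti : ti < tgt.length
    · have htc : tgt[ti]? = some tgt[ti] := List.getElem?_eq_getElem hti
      have hcin : tgt[ti] ∈ src := hAll _ (List.getElem_mem hti)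
      have hone := pvOnePassA_eq src tgt 0 ti tgt[ti] hti htc
      have hprog : ti + 1 ≤ pvOnePassA src tgt ti := by
        obtain ⟨j0, t0, hpp⟩ : ∃ j0 t0, pvPosFrom src tgt[ti] 0 = j0 :: t0 := by
          cases hp : pvPosFrom src tgt[ti] 0 with
          | nil => exact absurd hp (pvPosFrom_ne_nil src tgt[ti] 0 hcin)
          | cons a b => exact ⟨a, b, rfl⟩
        rw [hpp] at hone
        rw [hone]
        exact pvOnePassA_le _ _ _
      simp only [pvLoopA, if_pos hti]
      rw [ihf (pvOnePassA src tgt ti) (cnt + 1) (by omega)]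
      have hk := pvKey src tgt hAll (tgt.length - ti) ti 0 (cnt + 1) rfl
      norm_num at hk
      exact hk.symm
    · simp only [pvLoopA, if_neg hti]

theorem pvRgo_missing (src : List Char) :
    ∀ (rem : List Char) (cnt cur : Int), (∃ c ∈ rem, c ∉ src) →
    pvRgo src rem cnt cur = -1 := by
  intro rem
  induction rem with
  | nil => intro cnt cur h; simp at h
  | cons c rest ih =>
    intro cnt cur h
    obtain ⟨x, hx, hxs⟩ := h
    by_cases hc : c ∈ src
    · have hxrest : x ∈ rest := by
        rcases List.mem_cons.mp hx with rfl | h'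
        · exact absurd hc hxs
        · exact h'
      obtain ⟨j0, t0, hpp⟩ : ∃ j0 t0, pvPosFrom src c 0 = j0 :: t0 := by
        cases hp : pvPosFrom src c 0 with
        | nil => exact absurd hp (pvPosFrom_ne_nil src c 0 hc)
        | cons a b => exact ⟨a, b, rfl⟩
      have hsome : pvNxt src c (-1) = some j0 := by
        unfold pvNxt
        rw [pvFind?_all _ _ (fun y hy => by
          have := pvPosFrom_bounds src c 0 y hy
          simp only [decide_eq_true_eq]; omega)]
        rw [hpp]; rfl
      simp only [pvRgo]
      cases hcur : pvNxt src c cur with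
      | some j => exact ih cnt j ⟨x, hxrest, hxs⟩
      | none => rw [hsome]; exact ih (cnt + 1) j0 ⟨x, hxrest, hxs⟩
    · have hempty : pvPosFrom src c 0 = [] := pvPosFrom_nil src c 0 hc
      have h1 : pvNxt src c cur = none := by unfold pvNxt; rw [hempty]; rfl
      have h2 : pvNxt src c (-1) = none := by unfold pvNxt; rw [hempty]; rfl
      simp only [pvRgo, h1, h2]

-- ===== B-side lemmas =====

-- the position list is strictly increasing
theorem pvPosFrom_pairwise : ∀ (src : List Char) (c : Char) (k : Nat),
    (pvPosFrom src c k).Pairwise (· < ·) := by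
  intro src c
  induction src with
  | nil => intro k; simp [pvPosFrom]
  | cons d rest ih =>
    intro k
    simp only [pvPosFrom]
    split
    · refine List.Pairwise.cons (fun x hx => ?_) (ih (k + 1))
      have := pvPosFrom_bounds rest c (k + 1) x hx
      push_cast at this ⊢; omega
    · exact ih (k + 1)

-- getD is monotone on a sorted list
theorem pvSorted_getD_mono (ps : List Int) (hs : ps.Pairwise (· < ·))
    (i j : Nat) (hij : i ≤ j) (hj : j < ps.length) : ps.getD i 0 ≤ ps.getD j 0 := by
  rw [List.getD_eq_getElem ps 0 (by omega), List.getD_eq_getElem ps 0 hj]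
  rcases Nat.lt_or_ge i j with h | h
  · exact le_of_lt ((List.pairwise_iff_getElem.mp hs) i j (by omega) hj h)
  · have : i = j := by omega
    subst this; exact le_refl _

-- the binary search finds the first index whose position is ≥ cur
theorem pvBisect_spec (ps : List Int) (cur : Int) (hs : ps.Pairwise (· < ·)) :
    ∀ (n lo hi : Nat), hi - lo = n → lo ≤ hi → hi ≤ ps.length →
    (∀ i, i < lo → ps.getD i 0 < cur) →
    (∀ i, hi ≤ i → i < ps.length → ¬ ps.getD i 0 < cur) →
    (pvBisect ps cur lo hi ≤ ps.length ∧
     (∀ i, i < pvBisect ps cur lo hi → ps.getD i 0 < cur) ∧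
     (pvBisect ps cur lo hi < ps.length → ¬ ps.getD (pvBisect ps cur lo hi) 0 < cur)) := by
  intro n
  induction n using Nat.strong_induction_on with
  | _ n ih =>
    intro lo hi hn hlohi hhil hlow hhigh
    rw [pvBisect]
    by_cases h : lo < hi
    · rw [dif_pos h]
      simp only []
      by_cases hmid : ps.getD ((lo + hi) / 2) 0 < cur
      · rw [if_pos hmid]
        refine ih (hi - ((lo + hi) / 2 + 1)) (by omega) ((lo + hi) / 2 + 1) hi rfl (by omega) hhil
          (fun i hi' => ?_) hhigh
        have : ps.getD i 0 ≤ ps.getD ((lo + hi) / 2) 0 :=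
          pvSorted_getD_mono ps hs i ((lo + hi) / 2) (by omega) (by omega)
        omega
      · rw [if_neg hmid]
        refine ih ((lo + hi) / 2 - lo) (by omega) lo ((lo + hi) / 2) rfl (by omega) (by omega)
          hlow (fun i hi1 hi2 => ?_)
        have : ps.getD ((lo + hi) / 2) 0 ≤ ps.getD i 0 :=
          pvSorted_getD_mono ps hs ((lo + hi) / 2) i hi1 hi2
        omega
    · rw [dif_neg h]
      have : lo = hi ∨ hi < lo := by omega
      exact ⟨by omega, fun i hi' => hlow i hi', fun hlt => by
        rcases this with rfl | h'
        · exact hhigh _ (le_refl _) hlt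
        · exact absurd (hlow lo (by omega)) (hhigh lo (by omega) (by omega) ) ⟩

-- find? through the first index where a monotone-threshold predicate flips
theorem pvFind?_firstIdx (p : Int → Bool) : ∀ (ps : List Int) (m : Nat),
    (∀ i, i < m → i < ps.length → p (ps.getD i 0) = false) →
    (m < ps.length → p (ps.getD m 0) = true) →
    ps.find? p = ps[m]? := by
  intro ps
  induction ps with
  | nil => intro m _ _; simp
  | cons a t iht =>
    intro m hlow hhit
    cases m with
    | zero =>
      have := hhit (by simp)
      simp only [List.getD_cons_zero] at this
      rw [List.find?_cons_of_pos this]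
      rfl
    | succ m' =>
      have ha : p a = false := by
        have := hlow 0 (by omega) (by simp)
        simpa using this
      rw [List.find?_cons_of_neg (by simp [ha])]
      rw [List.getElem?_cons_succ]
      refine iht m' (fun i h1 h2 => ?_) (fun h => ?_)
      · have := hlow (i + 1) (by omega) (by simp; omega)
        simpa using this
      · have := hhit (by simp; omega)
        simpa using this

-- the dict built by B holds exactly the position lists
theorem pvBuild_getD_aux : ∀ (src : List Char) (d : PySem.Dict Char (List Int)) (k : Nat) (c : Char),
    ((PySem.List.enumerate src (k : Int)).foldl
        (fun d p => d.modify p.2 [] (· ++ [p.1])) d).getD c []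
      = d.getD c [] ++ pvPosFrom src c k := by
  intro src
  induction src with
  | nil => intro d k c; simp [PySem.List.enumerate_nil, pvPosFrom]
  | cons x rest ih =>
    intro d k c
    rw [PySem.List.enumerate_cons]
    simp only [List.foldl_cons]
    have hk1 : (k : Int) + 1 = ((k + 1 : Nat) : Int) := by push_cast; ring
    rw [hk1, ih (d.modify x [] (· ++ [(k : Int)])) (k + 1) c]
    rw [PySem.Dict.getD_modify]
    by_cases hc : x = c
    · subst hc
      rw [if_pos rfl]
      simp [pvPosFrom, List.append_assoc]
    · rw [if_neg (Ne.symm hc)]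
      simp only [pvPosFrom, if_neg hc]

theorem pvBuild_getD (src : List Char) (c : Char) :
    (pvBuildPos src).getD c [] = pvPosFrom src c 0 := by
  unfold pvBuildPos
  have h := pvBuild_getD_aux src PySem.Dict.empty 0 c
  simp only [Nat.cast_zero] at h
  rw [h]
  simp [PySem.Dict.getD_empty]

-- B's loop equals the reference loop (with cur shifted by one)
theorem pvLoopB_eq_Rgo (src : List Char) :
    ∀ (rem : List Char) (cnt cur : Int),
    pvLoopB (pvBuildPos src) rem cnt cur = pvRgo src rem cnt (cur - 1) := by
  intro rem
  induction rem with
  | nil => intro cnt cur; rfl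
  | cons c rest ih =>
    intro cnt cur
    simp only [pvLoopB, pvRgo, pvBuild_getD src c]
    by_cases hemp : pvPosFrom src c 0 = []
    · rw [if_pos (by simp [hemp])]
      have h1 : pvNxt src c (cur - 1) = none := by unfold pvNxt; rw [hemp]; rfl
      have h2 : pvNxt src c (-1) = none := by unfold pvNxt; rw [hemp]; rfl
      rw [h1, h2]
    · rw [if_neg (by simp [hemp])]
      set ps := pvPosFrom src c 0 with hps
      have hs : ps.Pairwise (· < ·) := pvPosFrom_pairwise src c 0
      obtain ⟨hr1, hr2, hr3⟩ := pvBisect_spec ps cur hs ps.length 0 ps.length rfl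
        (Nat.zero_le _) (le_refl _) (fun i h => by omega) (fun i h1 h2 => by omega)
      set r := pvBisect ps cur 0 ps.length with hr
      have hfind : pvNxt src c (cur - 1) = ps[r]? := by
        unfold pvNxt
        rw [← hps]
        refine pvFind?_firstIdx _ ps r (fun i h1 h2 => ?_) (fun h => ?_)
        · have := hr2 i h1
          simp only [decide_eq_false_iff_not]
          omega
        · have := hr3 h
          simp only [decide_eq_true_eq]
          omega
      by_cases hrl : r = ps.length
      · rw [if_pos hrl]
        have hnone : pvNxt src c (cur - 1) = none := by
          rw [hfind, hrl]
          simp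
        rw [hnone]
        obtain ⟨j0, t0, hpp⟩ : ∃ j0 t0, ps = j0 :: t0 := by
          cases hp : ps with
          | nil => exact absurd hp hemp
          | cons a b => exact ⟨a, b, rfl⟩
        have hm1 : pvNxt src c (-1) = some j0 := by
          unfold pvNxt
          rw [pvFind?_all _ _ (fun x hx => by
            have := pvPosFrom_bounds src c 0 x hx
            simp only [decide_eq_true_eq]; omega), ← hps, hpp]
          rfl
        rw [hm1]
        have hget0 : ps.getD 0 0 = j0 := by rw [hpp]; rfl
        rw [hget0, ih (cnt + 1) (j0 + 1)]
        norm_num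
      · rw [if_neg hrl]
        have hrlen : r < ps.length := by omega
        have hsome : pvNxt src c (cur - 1) = some (ps.getD r 0) := by
          rw [hfind, List.getElem?_eq_getElem hrlen, List.getD_eq_getElem ps 0 hrlen]
        rw [hsome, ih cnt (ps.getD r 0 + 1)]
        norm_num

-- ===== VERDICT (by name: the statement is the Claim_ definition above) =====
theorem min_subsequences_spec : Claim_equal_min_subsequences := by
  unfold Claim_equal_min_subsequences
  intro source target _
  unfold Spec_min_subsequences
  simp only [min_subsequences, min_subsequences_alt]
  set src := source.toList with hsrc
  set tgt := target.toList with htgt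
  cases htg : tgt with
  | nil => simp [pvLoopA, pvLoopB]
  | cons c0 rest =>
    simp only [List.isEmpty_cons, Bool.false_eq_true, if_false]
    have hb := pvLoopB_eq_Rgo src (c0 :: rest) 1 0
    norm_num at hb
    by_cases hAll : ∀ c ∈ (c0 :: rest), c ∈ src
    · have hAllb : (c0 :: rest).all (fun c => PySem.Set.contains (PySem.Set.ofList src) c) = true := by
        rw [List.all_eq_true]
        intro c hcm
        rw [PySem.Set.contains_iff, PySem.Set.mem_ofList]
        exact hAll c hcm
      rw [if_pos hAllb]
      have hlen : 0 < (c0 :: rest).length := by simp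
      have := pvLoopA_eq_Rgo src (c0 :: rest) hAll ((c0 :: rest).length + 1) 0 0 (by omega)
      rw [this, if_pos hlen, List.drop_zero, hb]
      norm_num
    · have hAllb : (c0 :: rest).all (fun c => PySem.Set.contains (PySem.Set.ofList src) c) = false := by
        rw [Bool.eq_false_iff]
        intro hcontra
        rw [List.all_eq_true] at hcontra
        exact hAll (fun c hcm => by
          have := hcontra c hcm
          rwa [PySem.Set.contains_iff, PySem.Set.mem_ofList] at this)
      have hneg : ¬ (((c0 :: rest).all fun c => (PySem.Set.ofList src).contains c) = true) := by
        rw [hAllb]; simp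
      rw [if_neg hneg, hb]
      push Not at hAll
      rw [pvRgo_missing src (c0 :: rest) 1 (-1) hAll]
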